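-- pv_equiv track=rewrite | github.com/avadoe/Leetcode75 | combinationalSum.py | combinationalSum3
-- ===== SOURCE A (Python) =====
-- def combinationalSum3(k, n):
--     ans = []
--
--     def backtrack(start, so_far, remaining):
--         if len(so_far) == k and remaining == 0:
--             ans.append(so_far[:])
--             return
--
--         if len(so_far) > k or remaining < 0:
--             return
--
--         for i in range(start, 10):
--             so_far.append(i)
--             backtrack(i + 1, so_far=so_far, remaining=remaining - i)
--             so_far.pop()
--
--     backtrack(1, [], n)
--     return ans
-- ===== SOURCE B (Python) =====
-- from itertools import combinations
--
-- def combinationalSum3(k, n):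
--     if k < 0 or k > 9:
--         return []
--     return [list(c) for c in combinations(range(1, 10), k) if sum(c) == n]
-- ===== Notes on version B (the rewrite author's own statement) =====
-- stated objective: idiomatic
-- what changed: Replaces the mutable-accumulator recursive backtracking with a single comprehension over itertools.combinations of the digits 1-9 filtered by sum (after a guard for k outside 0..9, where no combination exists), relying on the library's lexicographic order matching the DFS order.
import Mathlib
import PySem

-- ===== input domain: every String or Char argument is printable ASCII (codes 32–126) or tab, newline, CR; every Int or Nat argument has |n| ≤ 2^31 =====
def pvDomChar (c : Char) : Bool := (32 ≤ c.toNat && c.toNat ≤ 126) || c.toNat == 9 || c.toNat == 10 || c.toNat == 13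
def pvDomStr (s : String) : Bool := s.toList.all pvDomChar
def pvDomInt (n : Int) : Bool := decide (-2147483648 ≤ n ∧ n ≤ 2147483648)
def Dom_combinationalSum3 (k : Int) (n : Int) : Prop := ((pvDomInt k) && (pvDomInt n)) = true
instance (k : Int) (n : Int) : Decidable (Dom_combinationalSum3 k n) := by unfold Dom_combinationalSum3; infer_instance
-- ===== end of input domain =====

-- B replaces A's mutable-accumulator backtracking with a filtered enumeration of all
-- k-element combinations of 1..9 (idiomatic; same output order).

-- ===== PORT A =====
-- A's inner `backtrack` with its `for i in range(start, 10)` loop, ported as the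
-- mutual pair btA/loopA; `ans`/`so_far` mutation becomes returned/threaded lists.
mutual
def btA (k : Int) (start : Nat) (so_far : List Int) (remaining : Int) : List (List Int) :=
  if (so_far.length : Int) = k ∧ remaining = 0 then [so_far]
  else if (so_far.length : Int) > k ∨ remaining < 0 then []
  else loopA k start so_far remaining
  termination_by (10 - start, 1)
def loopA (k : Int) (i : Nat) (so_far : List Int) (remaining : Int) : List (List Int) :=
  if i < 10 then
    btA k (i + 1) (so_far ++ [(i : Int)]) (remaining - (i : Int)) ++ loopA k (i + 1) so_far remaining
  else []
  termination_by (10 - i, 0)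
end

def combinationalSum3 (k : Int) (n : Int) : List (List Int) := btA k 1 [] n

-- ===== PORT B =====
-- itertools.combinations(xs, j) in lexicographic order (hand-ported: no Lean library
-- function yields exactly this order).
def combs : Nat → List Int → List (List Int)
  | 0, _ => [[]]
  | _ + 1, [] => []
  | j + 1, x :: xs => (combs j xs).map (x :: ·) ++ combs (j + 1) xs

def combinationalSum3_alt (k : Int) (n : Int) : List (List Int) :=
  if k < 0 ∨ 9 < k then []
  else (combs k.toNat [1, 2, 3, 4, 5, 6, 7, 8, 9]).filter (fun c => c.sum = n)

-- ===== PRECONDITION & SPEC =====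
def Spec_combinationalSum3 (k : Int) (n : Int) (out : List (List Int)) : Prop := out = combinationalSum3_alt k n
instance (k : Int) (n : Int) (out : List (List Int)) : Decidable (Spec_combinationalSum3 k n out) := by unfold Spec_combinationalSum3; infer_instance

-- ===== CLAIM (what is proved, stated in full; the proofs are below) =====
def Claim_equal_combinationalSum3 : Prop := ∀ (k : Int) (n : Int), Dom_combinationalSum3 k n → Spec_combinationalSum3 k n (combinationalSum3 k n)

-- ===== LEMMAS AND PROOFS =====

-- the digits [i, i+1, …, 9] still available at loop index i
def digits (i : Nat) : List Int := (List.range (10 - i)).map (fun t => ((i + t : Nat) : Int))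

lemma digits_cons {i : Nat} (h : i < 10) : digits i = (i : Int) :: digits (i + 1) := by
  unfold digits
  have h9 : 10 - i = (10 - (i + 1)) + 1 := by omega
  rw [h9, List.range_succ_eq_map, List.map_cons, List.map_map]
  simp only [Nat.add_zero]
  congr 1
  apply List.map_congr_left
  intro t _
  simp [Nat.succ_eq_add_one]
  ring

lemma digits_nil {i : Nat} (h : 10 ≤ i) : digits i = [] := by
  unfold digits
  have : 10 - i = 0 := by omega
  rw [this]; rfl

lemma mem_digits_nonneg {i : Nat} {x : Int} (hx : x ∈ digits i) : 0 ≤ x := by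
  unfold digits at hx
  simp only [List.mem_map, List.mem_range] at hx
  obtain ⟨t, _, rfl⟩ := hx
  positivity

lemma combs_succ_nil (j : Nat) : combs (j + 1) [] = [] := rfl

lemma mem_of_mem_combs : ∀ (j : Nat) (l c : List Int), c ∈ combs j l → ∀ x ∈ c, x ∈ l := by
  intro j l
  induction l generalizing j with
  | nil =>
    intro c hc x hx
    cases j with
    | zero => simp [combs] at hc; subst hc; simp at hx
    | succ j => simp [combs] at hc
  | cons y ys ih =>
    intro c hc x hx
    cases j with
    | zero =>
      simp [combs] at hc; subst hc; simp at hx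
    | succ j =>
      simp only [combs, List.mem_append, List.mem_map] at hc
      rcases hc with ⟨d, hd, rfl⟩ | hc
      · rcases List.mem_cons.mp hx with rfl | hx
        · exact List.mem_cons_self ..
        · exact List.mem_cons_of_mem _ (ih j d hd x hx)
      · exact List.mem_cons_of_mem _ (ih (j + 1) c hc x hx)

lemma combs_sum_nonneg {j i : Nat} {c : List Int} (hc : c ∈ combs j (digits i)) : 0 ≤ c.sum :=
  List.sum_nonneg (fun x hx => mem_digits_nonneg (mem_of_mem_combs j (digits i) c hc x hx))

-- loopA is empty once the prefix already has length ≥ k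
lemma loopA_full : ∀ (m i : Nat) (k : Int) (so_far : List Int) (r : Int),
    10 - i ≤ m → k ≤ (so_far.length : Int) → loopA k i so_far r = [] := by
  intro m
  induction m with
  | zero =>
    intro i k so_far r hm _
    rw [loopA]
    simp [show ¬ i < 10 by omega]
  | succ m ih =>
    intro i k so_far r hm hk
    rw [loopA]
    by_cases hi : i < 10
    · simp only [hi, if_true]
      rw [btA]
      have h1 : ¬ (((so_far ++ [(i : Int)]).length : Int) = k ∧ r - (i : Int) = 0) := by
        simp only [List.length_append, List.length_cons, List.length_nil]
        omega
      have h2 : ((so_far ++ [(i : Int)]).length : Int) > k ∨ r - (i : Int) < 0 := by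
        left; simp only [List.length_append, List.length_cons, List.length_nil]
        push_cast; omega
      rw [if_neg h1, if_pos h2]
      rw [ih (i + 1) k so_far r (by omega) hk]
      rfl
    · simp [hi]

-- the statements of the mutual invariant
lemma map_cons_filter (i r : Int) (L : List (List Int)) (pre : List Int) :
    ((L.map (i :: ·)).filter (fun c => decide (c.sum = r))).map (pre ++ ·)
      = (L.filter (fun c => decide (c.sum = r - i))).map (fun c => pre ++ i :: c) := by
  have hpq : ∀ c ∈ L, ((fun c : List Int => decide (c.sum = r)) ∘ (fun x => i :: x)) c
      = (fun c : List Int => decide (c.sum = r - i)) c := fun c _ => by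
    simp only [Function.comp_apply, List.sum_cons]
    rw [decide_eq_decide]
    omega
  rw [List.filter_map, List.filter_congr hpq, List.map_map]
  rfl

def PBt (i : Nat) : Prop := ∀ (k : Int) (so_far : List Int) (r : Int),
  (so_far.length : Int) ≤ k →
  btA k i so_far r =
    ((combs (k - so_far.length).toNat (digits i)).filter (fun c => c.sum = r)).map (so_far ++ ·)

def PLoop (i : Nat) : Prop := ∀ (k : Int) (so_far : List Int) (r : Int),
  (so_far.length : Int) < k →
  loopA k i so_far r =
    ((combs (k - so_far.length).toNat (digits i)).filter (fun c => c.sum = r)).map (so_far ++ ·)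

lemma bt_of_loop {i : Nat} (hL : PLoop i) : PBt i := by
  intro k so_far r hk
  rw [btA]
  by_cases heq : (so_far.length : Int) = k
  · -- length = k : combs 0 _ = [[]]
    have hj : (k - so_far.length).toNat = 0 := by omega
    rw [hj]
    by_cases hr : r = 0
    · subst hr
      rw [if_pos ⟨heq, rfl⟩]
      simp [combs]
    · rw [if_neg (by tauto)]
      by_cases hneg : r < 0
      · rw [if_pos (Or.inr hneg)]
        simp [combs]
        omega
      · rw [if_neg (by omega)]
        rw [loopA_full 10 i k so_far r (by omega) (le_of_eq heq.symm)]
        simp [combs]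
        omega
  · have hlt : (so_far.length : Int) < k := lt_of_le_of_ne hk heq
    rw [if_neg (by omega)]
    by_cases hneg : r < 0
    · -- pruned; RHS empty since every admitted combo has nonneg sum
      rw [if_pos (Or.inr hneg)]
      symm
      rw [List.map_eq_nil_iff, List.filter_eq_nil_iff]
      intro c hc
      have := combs_sum_nonneg hc
      simp only [decide_eq_true_eq]
      omega
    · rw [if_neg (by omega)]
      exact hL k so_far r hlt

lemma loop_step {i : Nat} (hi : i < 10) (hBt : PBt (i + 1)) (hL : PLoop (i + 1)) :
    PLoop i := by
  intro k so_far r hk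
  rw [loopA, if_pos hi]
  have hlen : ((so_far ++ [(i : Int)]).length : Int) ≤ k := by
    simp only [List.length_append, List.length_cons, List.length_nil]; push_cast; omega
  rw [hBt k (so_far ++ [(i : Int)]) (r - (i : Int)) hlen,
      hL k so_far r hk]
  rw [digits_cons hi]
  have hj : (k - so_far.length).toNat = (k - (so_far ++ [(i : Int)]).length).toNat + 1 := by
    simp only [List.length_append, List.length_cons, List.length_nil]; omega
  rw [hj]
  simp only [combs, List.filter_append, List.map_append]
  congr 1
  rw [map_cons_filter]
  exact List.map_congr_left (fun c _ => by simp)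

lemma invariant : ∀ (m i : Nat), 10 - i ≤ m → PLoop i ∧ PBt i := by
  intro m
  induction m with
  | zero =>
    intro i hm
    have hge : 10 ≤ i := by omega
    have hL : PLoop i := by
      intro k so_far r _
      rw [loopA, if_neg (by omega), digits_nil hge]
      have : (k - so_far.length).toNat = (k - so_far.length).toNat - 1 + 1 := by omega
      rw [this, combs_succ_nil]
      rfl
    exact ⟨hL, bt_of_loop hL⟩
  | succ m ih =>
    intro i hm
    by_cases hi : i < 10
    · obtain ⟨hL', hB'⟩ := ih (i + 1) (by omega)
      have hL := loop_step hi hB' hL'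
      exact ⟨hL, bt_of_loop hL⟩
    · exact ih i (by omega)

lemma combs_big : ∀ (l : List Int) (j : Nat), l.length < j → combs j l = [] := by
  intro l
  induction l with
  | nil =>
    intro j hj
    cases j with
    | zero => omega
    | succ j => rfl
  | cons x xs ih =>
    intro j hj
    cases j with
    | zero => omega
    | succ j =>
      simp only [combs, List.append_eq_nil_iff, List.map_eq_nil_iff]
      exact ⟨ih j (by simp only [List.length_cons] at hj; omega), ih (j + 1) (by simp only [List.length_cons] at hj; omega)⟩

-- ===== VERDICT (by name: the statement is the Claim_ definition above) =====
theorem combinationalSum3_spec : Claim_equal_combinationalSum3 := by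
  intro k n _
  unfold Spec_combinationalSum3 combinationalSum3 combinationalSum3_alt
  by_cases hk : k < 0
  · have h1 : ¬((([]:List Int).length : Int) = k ∧ n = 0) := by
      simp only [List.length_nil, Nat.cast_zero]; omega
    have h2 : (([]:List Int).length : Int) > k ∨ n < 0 := by
      left; simp only [List.length_nil, Nat.cast_zero]; omega
    rw [btA, if_neg h1, if_pos h2, if_pos (Or.inl hk)]
  · have h := (invariant 10 1 (by omega)).2 k [] n (by simpa using not_lt.mp hk)
    rw [h]
    have hd : digits 1 = [1, 2, 3, 4, 5, 6, 7, 8, 9] := by decide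
    rw [hd]
    by_cases hk9 : 9 < k
    · rw [if_pos (Or.inr hk9), combs_big _ _ (by simp; omega)]
      rfl
    · rw [if_neg (by omega)]
      simp
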